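-- pv_equiv track=rewrite | github.com/b-3llum/kerb-map | kerb_map/ldap_helpers.py | _unescape_rdn_value
-- ===== SOURCE A (Python) =====
-- def _unescape_rdn_value(value: str) -> str:
--     """RFC 4514 §2.4 unescape — collapse ``\\,`` → ``,``, ``\\+`` → ``+``,
--     ``\\\\`` → ``\\`` etc. Hex pairs ``\\HH`` become the byte they encode."""
--     out: list[str] = []
--     i = 0
--     while i < len(value):
--         ch = value[i]
--         if ch != "\\" or i + 1 >= len(value):
--             out.append(ch)
--             i += 1
--             continue
--         nxt = value[i + 1]
--         if i + 2 < len(value) and _is_hex(nxt) and _is_hex(value[i + 2]):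
--             try:
--                 out.append(bytes.fromhex(value[i + 1:i + 3]).decode("utf-8", "replace"))
--                 i += 3
--                 continue
--             except ValueError:
--                 pass
--         out.append(nxt)
--         i += 2
--     return "".join(out)
--
-- def _is_hex(c: str) -> bool:
--     return c in "0123456789abcdefABCDEF"
-- ===== SOURCE B (Python) =====
-- def _unescape_rdn_value(value: str) -> str:
--     """One-pass state-machine unescape: no indexing or lookahead;
--     states: 0 = normal, 1 = just after backslash, 2 = after backslash + one hex digit."""
--     out: list[str] = []
--     state = 0
--     h = ""
--     for c in value:
--         if state == 0:
--             if c == "\\":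
--                 state = 1
--             else:
--                 out.append(c)
--         elif state == 1:
--             if c in "0123456789abcdefABCDEF":
--                 h = c
--                 state = 2
--             else:
--                 out.append(c)
--                 state = 0
--         else:  # state == 2
--             if c in "0123456789abcdefABCDEF":
--                 out.append(bytes.fromhex(h + c).decode("utf-8", "replace"))
--                 state = 0
--             elif c == "\\":
--                 out.append(h)
--                 state = 1
--             else:
--                 out.append(h)
--                 out.append(c)
--                 state = 0
--     if state == 1:
--         out.append("\\")
--     elif state == 2:
--         out.append(h)
--     return "".join(out)
-- ===== Notes on version B (the rewrite author's own statement) =====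
-- stated objective: alternative
-- what changed: Replaces the index-based while-loop with up-to-2-character lookahead and slicing by a single forward pass driven by a 3-state machine (normal / after-backslash / after-backslash-plus-one-hex-digit) with an end-of-input flush, so no position arithmetic or slicing remains.
import Mathlib
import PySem

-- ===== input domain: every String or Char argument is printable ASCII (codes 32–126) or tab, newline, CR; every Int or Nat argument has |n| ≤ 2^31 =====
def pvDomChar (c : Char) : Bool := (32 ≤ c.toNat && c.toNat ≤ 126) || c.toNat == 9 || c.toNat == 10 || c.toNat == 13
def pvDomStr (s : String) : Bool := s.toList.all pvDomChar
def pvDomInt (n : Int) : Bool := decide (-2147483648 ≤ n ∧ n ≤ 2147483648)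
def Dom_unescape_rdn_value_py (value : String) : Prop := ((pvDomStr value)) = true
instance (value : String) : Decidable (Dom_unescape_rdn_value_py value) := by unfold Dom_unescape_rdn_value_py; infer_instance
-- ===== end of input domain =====

-- B replaces A's index loop with lookahead by a one-pass 3-state machine; objective: alternative (same cost).

-- shared helpers (both Pythons test hex digits and decode "\HH" with bytes.fromhex(..).decode('utf-8','replace'))
def pvIsHex (c : Char) : Bool := "0123456789abcdefABCDEF".toList.contains c
def pvHexVal (c : Char) : Nat :=
  if c.isDigit then c.toNat - 48
  else if 'a' ≤ c ∧ c ≤ 'f' then c.toNat - 87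
  else c.toNat - 55
-- exact: a single byte < 0x80 decodes to itself; a byte ≥ 0x80 is invalid UTF-8 alone and 'replace' yields U+FFFD
def pvDecodePair (a b : Char) : Char :=
  let n := 16 * pvHexVal a + pvHexVal b
  if n < 128 then Char.ofNat n else Char.ofNat 0xFFFD

-- ===== PORT A =====
-- literal port of A's while-loop over index i with output list `out`
def pvLoopA (cs : List Char) (i : Nat) (out : List Char) : List Char :=
  if h : i < cs.length then
    let ch := cs[i]
    if ch ≠ '\\' ∨ cs.length ≤ i + 1 then
      pvLoopA cs (i + 1) (out ++ [ch])
    else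
      let nxt := cs.getD (i + 1) ' '
      if i + 2 < cs.length ∧ pvIsHex nxt ∧ pvIsHex (cs.getD (i + 2) ' ') then
        pvLoopA cs (i + 3) (out ++ [pvDecodePair nxt (cs.getD (i + 2) ' ')])
      else
        pvLoopA cs (i + 2) (out ++ [nxt])
  else out
termination_by cs.length - i

def unescape_rdn_value_py (value : String) : String :=
  String.mk (pvLoopA value.toList 0 [])

-- ===== PORT B =====
-- B's state machine: 0 = normal, 1 = after backslash, 2 = after backslash + one hex digit h
inductive PvState where
  | normal : PvState
  | esc : PvState
  | hex1 : Char → PvState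
deriving DecidableEq, Repr

def pvStep (acc : PvState × List Char) (c : Char) : PvState × List Char :=
  match acc with
  | (PvState.normal, out) =>
      if c = '\\' then (PvState.esc, out) else (PvState.normal, out ++ [c])
  | (PvState.esc, out) =>
      if pvIsHex c then (PvState.hex1 c, out) else (PvState.normal, out ++ [c])
  | (PvState.hex1 h, out) =>
      if pvIsHex c then (PvState.normal, out ++ [pvDecodePair h c])
      else if c = '\\' then (PvState.esc, out ++ [h])
      else (PvState.normal, out ++ [h, c])

def pvFlush (acc : PvState × List Char) : List Char :=
  match acc with
  | (PvState.normal, out) => out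
  | (PvState.esc, out) => out ++ ['\\']
  | (PvState.hex1 h, out) => out ++ [h]

def unescape_rdn_value_py_alt (value : String) : String :=
  String.mk (pvFlush (value.toList.foldl pvStep (PvState.normal, [])))

-- ===== PRECONDITION & SPEC =====
def Spec_unescape_rdn_value_py (value : String) (out : String) : Prop := out = unescape_rdn_value_py_alt value
instance (value : String) (out : String) : Decidable (Spec_unescape_rdn_value_py value out) := by unfold Spec_unescape_rdn_value_py; infer_instance

-- ===== CLAIM (what is proved, stated in full; the proofs are below) =====
def Claim_equal_unescape_rdn_value_py : Prop := ∀ (value : String), Dom_unescape_rdn_value_py value → Spec_unescape_rdn_value_py value (unescape_rdn_value_py value)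

-- ===== LEMMAS AND PROOFS =====

-- canonical head recursion both ports are reduced to
def pvG : List Char → List Char
  | [] => []
  | c :: rest =>
    if c = '\\' then
      match rest with
      | [] => ['\\']
      | a :: rest2 =>
        match rest2 with
        | [] => [a]
        | b :: rest3 =>
          if pvIsHex a ∧ pvIsHex b then pvDecodePair a b :: pvG rest3
          else a :: pvG (b :: rest3)
    else c :: pvG rest

lemma pvG_nil : pvG [] = [] := by rw [pvG.eq_def]

lemma pvG_cons_ne (c : Char) (rest : List Char) (h : ¬ c = '\\') :
    pvG (c :: rest) = c :: pvG rest := by rw [pvG.eq_def]; simp [h]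

lemma pvG_bs_nil : pvG ['\\'] = ['\\'] := by rw [pvG.eq_def]; simp

lemma pvG_bs_one (a : Char) : pvG ['\\', a] = [a] := by rw [pvG.eq_def]; simp

lemma pvG_bs_hex (a b : Char) (rest : List Char)
    (ha : pvIsHex a = true) (hb : pvIsHex b = true) :
    pvG ('\\' :: a :: b :: rest) = pvDecodePair a b :: pvG rest := by
  rw [pvG.eq_def]; simp [ha, hb]

lemma pvG_bs_nothex (a b : Char) (rest : List Char)
    (h : ¬ (pvIsHex a = true ∧ pvIsHex b = true)) :
    pvG ('\\' :: a :: b :: rest) = a :: pvG (b :: rest) := by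
  rw [pvG.eq_def]; simp only [reduceIte]; rw [if_neg (by simpa using h)]

lemma pvLoopA_eq_g (cs : List Char) : ∀ n i out, cs.length - i ≤ n →
    pvLoopA cs i out = out ++ pvG (cs.drop i) := by
  intro n
  induction n with
  | zero =>
    intro i out hle
    have hge : cs.length ≤ i := by omega
    rw [pvLoopA, dif_neg (by omega), List.drop_eq_nil_of_le hge, pvG_nil, List.append_nil]
  | succ n ih =>
    intro i out hle
    by_cases hi : i < cs.length
    · have hdrop : cs.drop i = cs[i] :: cs.drop (i + 1) :=
        List.drop_eq_getElem_cons hi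
      rw [pvLoopA, dif_pos hi]
      by_cases hbr : cs[i] ≠ '\\' ∨ cs.length ≤ i + 1
      · rw [if_pos hbr, ih (i+1) (out ++ [cs[i]]) (by omega), hdrop]
        rcases hbr with hne | hlen
        · rw [pvG_cons_ne _ _ hne, List.append_assoc]; rfl
        · have h1 : cs.drop (i+1) = [] := List.drop_eq_nil_of_le hlen
          rw [h1, pvG_nil, List.append_nil]
          by_cases hc : cs[i] = '\\'
          · rw [hc, pvG_bs_nil]
          · rw [pvG_cons_ne _ _ hc, pvG_nil]
      · push_neg at hbr
        obtain ⟨hch, h1⟩ := hbr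
        rw [if_neg (by push_neg; exact ⟨hch, h1⟩)]
        have hdrop1 : cs.drop (i+1) = cs[i+1] :: cs.drop (i + 2) :=
          List.drop_eq_getElem_cons h1
        have hnxt : cs.getD (i+1) ' ' = cs[i+1] := List.getD_eq_getElem cs ' ' h1
        by_cases h2 : i + 2 < cs.length
        · have hdrop2 : cs.drop (i+2) = cs[i+2] :: cs.drop (i + 3) :=
            List.drop_eq_getElem_cons h2
          have hb : cs.getD (i+2) ' ' = cs[i+2] := List.getD_eq_getElem cs ' ' h2
          by_cases hhex : pvIsHex cs[i+1] = true ∧ pvIsHex cs[i+2] = true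
          · rw [if_pos (by exact ⟨h2, by rw [hnxt]; exact hhex.1, by rw [hb]; exact hhex.2⟩),
               ih (i+3) _ (by omega), hnxt, hb, hdrop, hch, hdrop1, hdrop2,
               pvG_bs_hex _ _ _ hhex.1 hhex.2, List.append_assoc]
            rfl
          · rw [if_neg (by rw [hnxt, hb]; tauto), ih (i+2) _ (by omega), hnxt, hdrop, hch,
               hdrop1, hdrop2, pvG_bs_nothex _ _ _ hhex, ← hdrop2, List.append_assoc]
            rfl
        · rw [if_neg (by omega), ih (i+2) _ (by omega), hnxt, hdrop, hch, hdrop1,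
             List.drop_eq_nil_of_le (show cs.length ≤ i + 2 by omega), pvG_nil,
             pvG_bs_one, List.append_nil]
    · rw [pvLoopA, dif_neg hi, List.drop_eq_nil_of_le (by omega), pvG_nil, List.append_nil]

-- invariant meaning of a state: the input the machine still "owes" to the canonical recursion
def pvPend (st : PvState) (l : List Char) : List Char :=
  match st with
  | PvState.normal => l
  | PvState.esc => '\\' :: l
  | PvState.hex1 h => '\\' :: h :: l

def pvStOk (st : PvState) : Prop :=
  match st with
  | PvState.hex1 h => pvIsHex h = true
  | _ => True

lemma pvHexBs : pvIsHex '\\' = false := rfl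

lemma pvFoldl_eq_g : ∀ (l : List Char) (st : PvState) (out : List Char), pvStOk st →
    pvFlush (l.foldl pvStep (st, out)) = out ++ pvG (pvPend st l) := by
  intro l
  induction l with
  | nil =>
    intro st out hok
    cases st with
    | normal => simp [pvFlush, pvPend, pvG_nil]
    | esc => simp [pvFlush, pvPend, pvG_bs_nil]
    | hex1 h => simp [pvFlush, pvPend, pvG_bs_one]
  | cons c rest ih =>
    intro st out hok
    cases st with
    | normal =>
      by_cases hc : c = '\\'
      · rw [List.foldl_cons, show pvStep (PvState.normal, out) c = (PvState.esc, out) by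
          simp [pvStep, hc], ih PvState.esc out trivial, hc]
        rfl
      · rw [List.foldl_cons, show pvStep (PvState.normal, out) c = (PvState.normal, out ++ [c]) by
          simp [pvStep, hc], ih PvState.normal (out ++ [c]) trivial]
        show out ++ [c] ++ pvG rest = out ++ pvG (c :: rest)
        rw [pvG_cons_ne _ _ hc, List.append_assoc]; rfl
    | esc =>
      by_cases hh : pvIsHex c
      · rw [List.foldl_cons, show pvStep (PvState.esc, out) c = (PvState.hex1 c, out) by
          simp [pvStep, hh], ih (PvState.hex1 c) out (by simpa [pvStOk] using hh)]
        rfl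
      · rw [List.foldl_cons, show pvStep (PvState.esc, out) c = (PvState.normal, out ++ [c]) by
          simp [pvStep, hh], ih PvState.normal (out ++ [c]) trivial]
        show out ++ [c] ++ pvG rest = out ++ pvG ('\\' :: c :: rest)
        cases rest with
        | nil => rw [pvG_nil, pvG_bs_one, List.append_nil]
        | cons b r =>
          rw [pvG_bs_nothex _ _ _ (by tauto), List.append_assoc]; rfl
    | hex1 h =>
      have hH : pvIsHex h = true := hok
      by_cases hh : pvIsHex c
      · rw [List.foldl_cons, show pvStep (PvState.hex1 h, out) c =
            (PvState.normal, out ++ [pvDecodePair h c]) by simp [pvStep, hh],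
          ih PvState.normal (out ++ [pvDecodePair h c]) trivial]
        show out ++ [pvDecodePair h c] ++ pvG rest = out ++ pvG ('\\' :: h :: c :: rest)
        rw [pvG_bs_hex _ _ _ hH hh, List.append_assoc]; rfl
      · by_cases hc : c = '\\'
        · rw [List.foldl_cons, show pvStep (PvState.hex1 h, out) c = (PvState.esc, out ++ [h]) by
            subst hc; simp [pvStep, pvHexBs], ih PvState.esc (out ++ [h]) trivial, hc]
          show out ++ [h] ++ pvG ('\\' :: rest) = out ++ pvG ('\\' :: h :: '\\' :: rest)
          rw [pvG_bs_nothex _ _ _ (by simp [pvHexBs]), List.append_assoc]; rfl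
        · rw [List.foldl_cons, show pvStep (PvState.hex1 h, out) c = (PvState.normal, out ++ [h, c]) by
            simp [pvStep, hh, hc], ih PvState.normal (out ++ [h, c]) trivial]
          show out ++ [h, c] ++ pvG rest = out ++ pvG ('\\' :: h :: c :: rest)
          rw [pvG_bs_nothex _ _ _ (by tauto), pvG_cons_ne _ _ hc, List.append_assoc]; rfl

-- ===== VERDICT (by name: the statement is the Claim_ definition above) =====
theorem unescape_rdn_value_py_spec : Claim_equal_unescape_rdn_value_py := by
  intro value _
  unfold Spec_unescape_rdn_value_py unescape_rdn_value_py unescape_rdn_value_py_alt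
  rw [pvLoopA_eq_g value.toList (value.toList.length) 0 [] (by omega),
      pvFoldl_eq_g value.toList PvState.normal [] trivial]
  rfl
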